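-- pv_equiv track=rewrite | github.com/yiye3/ICLEval | code/generate_data/learning_ability/generate_format_conversion.py | get_markdown_table
-- ===== SOURCE A (Python) =====
-- def get_markdown_table(infos):
--     table_title = {}
--     table_content = {}
--     for info in infos:
--         info_type, info_content = info
--         keys = info_content.keys()
--         if info_type not in table_title:
--             title = "|Index|" + "|".join(keys) + "|\n"
--             title += "|---|" + "---|" * (len(keys)) + "\n"
--             table_title[info_type] = title
--         if info_type not in table_content:
--             table_content[info_type] = []
--
--         content = "|{}".format(len(table_content[info_type]) + 1)
--         for k in keys:
--             content += "|{}".format(info_content[k])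
--         content += "|\n"
--         table_content[info_type].append(content)
--
--     res = ""
--     for k in table_title.keys():
--         res += table_title[k]
--         for line in table_content[k]:
--             res += line
--         res += "\n"
--     return res
-- ===== SOURCE B (Python) =====
-- def get_markdown_table(infos):
--     # One grouping pass, then render each group from its collected rows.
--     groups = {}
--     for info_type, info_content in infos:
--         groups.setdefault(info_type, []).append(info_content)
--     blocks = []
--     for contents in groups.values():
--         keys = contents[0].keys()
--         header = "|Index|" + "|".join(keys) + "|\n" + "|---|" + "---|" * len(keys) + "\n"
--         rows = "".join(
--             "|{}".format(i) + "".join("|{}".format(c[k]) for k in c) + "|\n"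
--             for i, c in enumerate(contents, 1)
--         )
--         blocks.append(header + rows + "\n")
--     return "".join(blocks)
-- ===== Notes on version B (the rewrite author's own statement) =====
-- stated objective: alternative
-- what changed: A interleaves title/row string rendering inside one pass over infos, maintaining two parallel dicts of pre-rendered markdown strings; B first groups the raw info_content dicts by type in one pass, then renders each group's header (from its first element) and enumerated rows in a second pass.
import Mathlib
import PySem

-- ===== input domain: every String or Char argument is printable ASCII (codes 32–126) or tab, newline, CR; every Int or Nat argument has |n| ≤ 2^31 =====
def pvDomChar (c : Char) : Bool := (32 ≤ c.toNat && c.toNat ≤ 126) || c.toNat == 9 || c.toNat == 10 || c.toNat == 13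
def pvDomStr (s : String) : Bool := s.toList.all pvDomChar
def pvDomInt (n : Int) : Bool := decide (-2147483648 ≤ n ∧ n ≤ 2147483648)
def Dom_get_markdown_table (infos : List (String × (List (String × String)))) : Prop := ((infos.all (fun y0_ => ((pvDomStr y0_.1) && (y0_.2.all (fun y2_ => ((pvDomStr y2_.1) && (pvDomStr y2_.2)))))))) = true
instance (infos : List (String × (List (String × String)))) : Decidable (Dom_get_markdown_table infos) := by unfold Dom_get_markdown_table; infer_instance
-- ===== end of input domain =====

-- B restructures A's single interleaved pass (two parallel dicts of pre-rendered strings)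
-- into a grouping pass followed by a rendering pass over the groups; objective: alternative
-- decomposition, same asymptotic cost.

-- ===== PORT A =====
-- title = "|Index|" + "|".join(keys) + "|\n" + "|---|" + "---|"*len(keys) + "\n"
def pvTitleA (d : PySem.Dict String String) : List Char :=
  "|Index|".toList ++ PySem.Chars.join "|".toList (d.keys.map String.toList) ++ "|\n".toList
    ++ "|---|".toList ++ (List.replicate d.keys.length "---|".toList).flatten ++ "\n".toList

-- content = "|{idx}" ; for k in keys: content += "|{d[k]}" ; content += "|\n"
def pvRowA (d : PySem.Dict String String) (idx : Int) : List Char :=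
  (d.keys.foldl (fun acc k => acc ++ ('|' :: (d.getD k "").toList))
      ('|' :: PySem.Int.toChars idx)) ++ "|\n".toList

-- one iteration of A's first loop over the (table_title, table_content) pair
def pvStepA (st : PySem.Dict String (List Char) × PySem.Dict String (List (List Char)))
    (info : String × (List (String × String))) :
    PySem.Dict String (List Char) × PySem.Dict String (List (List Char)) :=
  let d := PySem.Dict.ofList info.2
  let tt := if st.1.contains info.1 then st.1 else st.1.insert info.1 (pvTitleA d)
  let tc := if st.2.contains info.1 then st.2 else st.2.insert info.1 []
  let rows := tc.getD info.1 []
  (tt, tc.insert info.1 (rows ++ [pvRowA d ((rows.length : Int) + 1)]))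

def get_markdown_table (infos : List (String × (List (String × String)))) : String :=
  let st := infos.foldl pvStepA (PySem.Dict.empty, PySem.Dict.empty)
  String.ofList (st.1.keys.foldl (fun res k =>
    ((st.2.getD k []).foldl (fun r line => r ++ line) (res ++ st.1.getD k [])) ++ "\n".toList) [])

-- ===== PORT B =====
-- header = "|Index|" + "|".join(keys) + "|\n" + "|---|" + "---|"*len(keys) + "\n"
def pvHeaderB (d : PySem.Dict String String) : List Char :=
  "|Index|".toList ++ PySem.Chars.join "|".toList (d.keys.map String.toList)
    ++ "|\n|---|".toList ++ (List.replicate d.keys.length "---|".toList).flatten ++ "\n".toList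

-- "|{i}" + "".join("|{c[k]}" for k in c) + "|\n"
def pvRowB (i : Nat) (c : PySem.Dict String String) : List Char :=
  '|' :: PySem.Int.toChars (i : Int)
    ++ (c.keys.map (fun k => '|' :: (c.getD k "").toList)).flatten ++ "|\n".toList

-- header + rows + "\n" for one group (contents is never empty when produced by the grouping pass)
def pvBlockB (contents : List (PySem.Dict String String)) : List Char :=
  match contents with
  | [] => []
  | c0 :: _ =>
    pvHeaderB c0 ++ ((contents.zipIdx 1).map (fun ci => pvRowB ci.2 ci.1)).flatten ++ "\n".toList

def get_markdown_table_alt (infos : List (String × (List (String × String)))) : String :=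
  let groups := infos.foldl
    (fun g info => g.modify info.1 [] (· ++ [PySem.Dict.ofList info.2])) PySem.Dict.empty
  String.ofList ((groups.values.map pvBlockB).flatten)

-- ===== PRECONDITION & SPEC =====
def Spec_get_markdown_table (infos : List (String × (List (String × String)))) (out : String) : Prop := out = get_markdown_table_alt infos
instance (infos : List (String × (List (String × String)))) (out : String) : Decidable (Spec_get_markdown_table infos out) := by unfold Spec_get_markdown_table; infer_instance

-- ===== CLAIM (what is proved, stated in full; the proofs are below) =====
def Claim_equal_get_markdown_table : Prop := ∀ (infos : List (String × (List (String × String)))), Dom_get_markdown_table infos → Spec_get_markdown_table infos (get_markdown_table infos)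

-- ===== LEMMAS AND PROOFS =====

-- the contents of the group of type t, in encounter order
def pvGrp (infos : List (String × (List (String × String)))) (t : String) :
    List (PySem.Dict String String) :=
  (infos.filter (fun p => p.1 == t)).map (fun p => PySem.Dict.ofList p.2)

lemma pvGrp_cons (p : String × (List (String × String))) (rest : List (String × (List (String × String)))) (t : String) :
    pvGrp (p :: rest) t =
      (if p.1 = t then [PySem.Dict.ofList p.2] else []) ++ pvGrp rest t := by
  by_cases h : p.1 = t
  · simp [pvGrp, h]
  · simp [pvGrp, h]

-- B's grouping fold, characterised
lemma pvGroupsB_getD (infos : List (String × (List (String × String)))) (t : String) :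
    (infos.foldl (fun g info => g.modify info.1 [] (· ++ [PySem.Dict.ofList info.2]))
        (PySem.Dict.empty : PySem.Dict String (List (PySem.Dict String String)))).getD t []
      = pvGrp infos t := by
  have h := PySem.Dict.getD_foldl_modify_append
      (infos.map (fun i => (i.1, PySem.Dict.ofList i.2)))
      (PySem.Dict.empty : PySem.Dict String (List (PySem.Dict String String))) t
  rw [List.foldl_map] at h
  simpa [pvGrp, List.filter_map, Function.comp] using h

lemma pvGroupsB_keys (infos : List (String × (List (String × String)))) :
    (infos.foldl (fun g info => g.modify info.1 [] (· ++ [PySem.Dict.ofList info.2]))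
        (PySem.Dict.empty : PySem.Dict String (List (PySem.Dict String String)))).keys
      = PySem.Set.update [] (infos.map (·.1)) := by
  have h := PySem.Dict.keys_foldl_modify_key infos (fun i => i.1) []
      (fun _ i => (· ++ [PySem.Dict.ofList i.2]))
      (PySem.Dict.empty : PySem.Dict String (List (PySem.Dict String String)))
  simpa using h

-- A's fold, characterised: keys, titles, and numbered rows
lemma pvFoldA_spec (infos : List (String × (List (String × String))))
    (tt : PySem.Dict String (List Char)) (tc : PySem.Dict String (List (List Char))) :
    (infos.foldl pvStepA (tt, tc)).1.keys = PySem.Set.update tt.keys (infos.map (·.1))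
    ∧ (∀ t, (infos.foldl pvStepA (tt, tc)).1.get? t
        = (tt.get? t).or ((pvGrp infos t).head?.map pvTitleA))
    ∧ (∀ t, (infos.foldl pvStepA (tt, tc)).2.getD t []
        = tc.getD t [] ++ ((pvGrp infos t).zipIdx ((tc.getD t []).length + 1)).map
            (fun ci => pvRowA ci.1 (ci.2 : Int))) := by
  induction infos generalizing tt tc with
  | nil => simp [pvGrp, PySem.Set.update]
  | cons p rest ih =>
    obtain ⟨s, c⟩ := p
    simp only [List.foldl_cons]
    set d := PySem.Dict.ofList c with hd
    set tt' := if tt.contains s then tt else tt.insert s (pvTitleA d) with htt'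
    set tcMid := if tc.contains s then tc else tc.insert s [] with htcMid
    have hMid : ∀ t, tcMid.getD t [] = tc.getD t [] := by
      intro t; rw [htcMid]; split_ifs with h2
      · rfl
      · rw [PySem.Dict.getD_insert]
        split_ifs with h3
        · subst h3; exact (PySem.Dict.getD_of_not_contains tc [] (by simpa using h2)).symm
        · rfl
    set rows := tcMid.getD s [] with hrowsdef
    have hrows : rows = tc.getD s [] := by rw [hrowsdef, hMid]
    have hstep : pvStepA (tt, tc) (s, c)
        = (tt', tcMid.insert s (rows ++ [pvRowA d ((rows.length : Int) + 1)])) := rfl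
    rw [hstep]
    set tc' := tcMid.insert s (rows ++ [pvRowA d ((rows.length : Int) + 1)]) with htc'
    obtain ⟨ihk, iht, ihc⟩ := ih tt' tc'
    have htcget : ∀ t, tc'.getD t [] =
        if t = s then rows ++ [pvRowA d ((rows.length : Int) + 1)] else tc.getD t [] := by
      intro t
      rw [htc', PySem.Dict.getD_insert]
      split_ifs with h
      · rfl
      · exact hMid t
    refine ⟨?_, ?_, ?_⟩
    · rw [ihk]
      have hadd : tt'.keys = PySem.Set.add tt.keys s := by
        by_cases h : tt.contains s = true
        · have hm : s ∈ tt.keys := (PySem.Dict.contains_iff_mem_keys tt s).mp h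
          rw [htt', if_pos h, PySem.Set.add, if_pos (by simpa using hm)]
        · have hm : s ∉ tt.keys := fun hc => h ((PySem.Dict.contains_iff_mem_keys tt s).mpr hc)
          rw [htt', if_neg h, PySem.Set.add, if_neg (by simpa using hm),
            PySem.Dict.keys_insert_of_not_contains tt _ (by simpa using h)]
      rw [hadd]
      simp [PySem.Set.update]
    · intro t
      rw [iht t, pvGrp_cons]
      by_cases hts : t = s
      · subst hts
        by_cases h : tt.contains t = true
        · have hsome : (tt.get? t).isSome = true := by
            rw [← PySem.Dict.contains_eq_isSome_get?]; exact h
          obtain ⟨v, hv⟩ := Option.isSome_iff_exists.mp hsome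
          have heq : tt'.get? t = tt.get? t := by rw [htt', if_pos h]
          rw [heq, hv]; simp
        · have hnone : tt.get? t = none := by
            rw [PySem.Dict.get?_eq_none_iff_contains]; simpa using h
          have heq : tt'.get? t = some (pvTitleA d) := by
            rw [htt', if_neg h, PySem.Dict.get?_insert, if_pos rfl]
          rw [heq, hnone]
          simp [← hd]
      · have heq : tt'.get? t = tt.get? t := by
          rw [htt']; split_ifs with h
          · rfl
          · rw [PySem.Dict.get?_insert, if_neg hts]
        rw [heq]
        simp [Ne.symm hts]
    · intro t
      rw [ihc t, htcget t, pvGrp_cons]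
      by_cases hts : t = s
      · subst hts
        rw [if_pos rfl, if_pos rfl, ← hrows]
        simp only [List.zipIdx_cons, List.map_cons,
          List.length_append, List.length_cons, List.length_nil, List.append_assoc,
          List.cons_append, List.nil_append]
        push_cast
        simp [← hd]
      · rw [if_neg hts, if_neg (fun h => hts (h.symm))]
        simp

-- A's rendered row equals B's rendered row
lemma pvRow_eq (d : PySem.Dict String String) (i : Nat) :
    pvRowA d (i : Int) = pvRowB i d := by
  rw [pvRowA, pvRowB, PySem.List.foldl_append_eq_flatMap]
  simp [List.flatMap]

-- A's title equals B's header
lemma pvTitle_eq (d : PySem.Dict String String) : pvTitleA d = pvHeaderB d := by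
  have h : "|\n|---|".toList = "|\n".toList ++ "|---|".toList := by decide
  rw [pvTitleA, pvHeaderB, h]
  simp [List.append_assoc]

-- members of Set.update [] xs are members of xs, and conversely
lemma pv_mem_update_nil {xs : List String} {t : String} :
    t ∈ PySem.Set.update ([] : PySem.Set String) xs ↔ t ∈ xs := by
  have : ∀ (s : PySem.Set String), t ∈ PySem.Set.update s xs ↔ t ∈ s ∨ t ∈ xs := by
    induction xs with
    | nil => intro s; simp [PySem.Set.update]
    | cons x rest ih =>
      intro s
      have : PySem.Set.update s (x :: rest) = PySem.Set.update (s.add x) rest := by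
        simp [PySem.Set.update]
      rw [this, ih, PySem.Set.mem_add, List.mem_cons]
      tauto
  rw [this]; simp

-- ===== VERDICT (by name: the statement is the Claim_ definition above) =====
theorem get_markdown_table_spec : Claim_equal_get_markdown_table := by
  intro infos _
  unfold Spec_get_markdown_table get_markdown_table get_markdown_table_alt
  obtain ⟨hk, ht, hc⟩ := pvFoldA_spec infos PySem.Dict.empty PySem.Dict.empty
  set stA := infos.foldl pvStepA (PySem.Dict.empty, PySem.Dict.empty) with hstA
  set gB := infos.foldl
    (fun g info => g.modify info.1 [] (· ++ [PySem.Dict.ofList info.2]))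
    (PySem.Dict.empty : PySem.Dict String (List (PySem.Dict String String))) with hgB
  have hkeysB : gB.keys = PySem.Set.update [] (infos.map (·.1)) := pvGroupsB_keys infos
  have hkeysA : stA.1.keys = PySem.Set.update [] (infos.map (·.1)) := by
    simpa using hk
  have hnodupB : gB.keys.Nodup := by
    rw [hgB]
    exact PySem.Dict.nodup_keys_foldl_modify_key infos (fun i => i.1) []
      (fun _ i => (· ++ [PySem.Dict.ofList i.2])) _ (by simp)
  -- rewrite B's values traversal as a traversal of its keys
  have hvals : gB.values = gB.keys.map (fun k => gB.getD k []) := by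
    have := PySem.Dict.items_eq_map_keys gB hnodupB []
    simp only [PySem.Dict.values, this, List.map_map]
    rfl
  have hshape : ∀ (res : List Char) (k : String),
      ((stA.2.getD k []).foldl (fun r line => r ++ line) (res ++ stA.1.getD k [])) ++ "\n".toList
        = res ++ (stA.1.getD k [] ++ ((stA.2.getD k []).flatten ++ "\n".toList)) := by
    intro res k
    rw [PySem.List.foldl_append_eq_flatMap (fun line => line)]
    simp [List.append_assoc, List.flatMap_def]
  simp only [hshape]
  rw [PySem.List.foldl_append_eq_flatMap
        (fun k => stA.1.getD k [] ++ ((stA.2.getD k []).flatten ++ "\n".toList))]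
  rw [hvals, List.map_map]
  rw [List.flatMap_def, hkeysA, ← hkeysB]
  simp only [List.nil_append]
  refine congrArg String.ofList (congrArg List.flatten (List.map_congr_left ?_))
  intro t htmem
  -- t really occurs among the info types
  have htin : t ∈ infos.map (·.1) := by
    rw [hkeysB] at htmem
    exact pv_mem_update_nil.mp htmem
  have hne : pvGrp infos t ≠ [] := by
    simp only [pvGrp]
    intro hnil
    obtain ⟨p, hp, hp1⟩ := List.mem_map.mp htin
    have : p ∈ infos.filter (fun p => p.1 == t) := by
      simp [List.mem_filter, hp, hp1]
    rw [List.map_eq_nil_iff.mp hnil] at this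
    simp at this
  obtain ⟨c0, cs, hgrp⟩ := List.exists_cons_of_ne_nil hne
  -- both sides for this t
  have hgetB : gB.getD t [] = c0 :: cs := by rw [hgB, pvGroupsB_getD, hgrp]
  have htitle : stA.1.getD t [] = pvTitleA c0 := by
    rw [PySem.Dict.getD_eq_get?_getD, ht t, hgrp]
    simp
  have hrows : stA.2.getD t [] = ((c0 :: cs).zipIdx 1).map (fun ci => pvRowA ci.1 (ci.2 : Int)) := by
    rw [hc t, hgrp]
    simp
  simp only [Function.comp_apply]
  rw [hgetB, pvBlockB, htitle, hrows, pvTitle_eq]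
  simp only [List.append_assoc]
  congr 2
  refine congrArg List.flatten (List.map_congr_left ?_)
  intro ci _
  exact pvRow_eq ci.1 ci.2
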